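-- pv_equiv track=rewrite | github.com/LupoBN/Deep-Learning-ass2 | Utils.py | parse_tag_reading
-- ===== SOURCE A (Python) =====
-- import copy
--
-- def parse_tag_reading(lines, seperator):
--     words = list()
--     labels = list()
--     sentence = list()
--     sentence_labels = list()
--     for line in lines:
--         if line != '':
--             words_labels = line.rsplit(seperator, 1)
--             sentence.append(words_labels[0])
--             sentence_labels.append(words_labels[1])
--         else:
--             sentence = ["^^^^^", "^^^^^"] + sentence + ["$$$$$", "$$$$$"]
--             sentence_labels = ["Start-", "Start-"] + sentence_labels + ["End-", "End-"]
--             words.append(copy.deepcopy(sentence))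
--             labels.append(copy.deepcopy(sentence_labels))
--             sentence = list()
--             sentence_labels = list()
--     return words, labels
-- ===== SOURCE B (Python) =====
-- def _group(pairs):
--     # Recursively split at the first boundary marker (None); the tail after
--     # the last boundary is dropped.
--     try:
--         i = pairs.index(None)
--     except ValueError:
--         return [], []
--     words, labels = _group(pairs[i + 1:])
--     chunk = pairs[:i]
--     return ([["^^^^^", "^^^^^"] + [w for w, _ in chunk] + ["$$$$$", "$$$$$"]] + words,
--             [["Start-", "Start-"] + [t for _, t in chunk] + ["End-", "End-"]] + labels)
--
--
-- def parse_tag_reading(lines, seperator):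
--     # Phase 1: tokenize every line into a (word, label) pair; None marks a
--     # sentence boundary.  Phase 2: recursive grouping by slicing.
--     pairs = []
--     for line in lines:
--         if line == '':
--             pairs.append(None)
--         else:
--             word, label = line.rsplit(seperator, 1)
--             pairs.append((word, label))
--     return _group(pairs)
-- ===== Notes on version B (the rewrite author's own statement) =====
-- stated objective: alternative
-- what changed: Replaces A's single streaming loop (four accumulator lists, deepcopy on every blank line) by two phases: tokenize each line once into (word,label) pairs with None as boundary marker, then recursively split the pair list at the first None with list.index and slicing, formatting each chunk by comprehensions.
import Mathlib
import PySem

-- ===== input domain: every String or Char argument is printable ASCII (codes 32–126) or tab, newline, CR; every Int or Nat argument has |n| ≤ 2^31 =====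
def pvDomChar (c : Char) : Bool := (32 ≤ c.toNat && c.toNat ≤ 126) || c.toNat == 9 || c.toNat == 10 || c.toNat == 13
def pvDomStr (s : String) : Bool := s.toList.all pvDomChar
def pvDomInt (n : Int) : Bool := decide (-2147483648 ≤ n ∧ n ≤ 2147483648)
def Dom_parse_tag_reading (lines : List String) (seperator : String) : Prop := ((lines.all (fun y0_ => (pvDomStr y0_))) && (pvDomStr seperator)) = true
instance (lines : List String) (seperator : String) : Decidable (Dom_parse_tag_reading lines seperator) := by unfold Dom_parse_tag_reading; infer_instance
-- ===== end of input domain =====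

-- ===== PORT A =====
-- B replaces A's streaming loop (four accumulators, deepcopy per blank line) by a tokenize pass
-- plus recursive splitting at the first boundary (list.index + slices); objective: alternative.
-- hand port of s.rsplit(sep, 1) for sep ≠ '' (exact there: split at the last occurrence; [s] when sep absent)
def pyRsplit1 (s sep : String) : List String :=
  let i := PySem.Str.rfind s sep
  if i < 0 then [s]
  else [PySem.Str.slice s none (some i), PySem.Str.slice s (some (i + (PySem.Str.len sep : Int))) none]

-- A's loop body over state (words, labels, sentence, sentence_labels); words_labels[1] would raise
-- IndexError when sep is absent — those inputs are outside Pre_ (the getD "" is never reached there).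
def paStep (sep : String) (st : List (List String) × List (List String) × List String × List String)
    (line : String) : List (List String) × List (List String) × List String × List String :=
  if line ≠ "" then
    let wl := pyRsplit1 line sep
    (st.1, st.2.1, st.2.2.1 ++ [(PySem.List.pyGet? wl 0).getD ""],
      st.2.2.2 ++ [(PySem.List.pyGet? wl 1).getD ""])
  else
    (st.1 ++ [["^^^^^", "^^^^^"] ++ st.2.2.1 ++ ["$$$$$", "$$$$$"]],
     st.2.1 ++ [["Start-", "Start-"] ++ st.2.2.2 ++ ["End-", "End-"]], [], [])

def parse_tag_reading (lines : List String) (seperator : String) : List (List String) × List (List String) :=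
  let st := lines.foldl (paStep seperator) ([], [], [], [])
  (st.1, st.2.1)

-- ===== PORT B =====
-- phase 1: tokenize; 'word, label = line.rsplit(sep, 1)' raises ValueError when the split has
-- one piece — outside Pre_; the getD "" there is never reached inside Pre_.
def pbTok (lines : List String) (sep : String) : List (Option (String × String)) :=
  lines.map (fun line =>
    if line = "" then none
    else
      let wl := pyRsplit1 line sep
      some ((PySem.List.pyGet? wl 0).getD "", (PySem.List.pyGet? wl 1).getD ""))

-- phase 2: recursive grouping; a chunk before the first None holds no None, so the
-- '[w for w, _ in chunk]' comprehension is ported with getD on pairs it never misses.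
def pbGroup (pairs : List (Option (String × String))) : List (List String) × List (List String) :=
  match h : PySem.List.index? pairs none with
  | none => ([], [])
  | some i =>
      let rest := pbGroup (PySem.List.slice pairs (some ((i : Int) + 1)) none)
      let chunk := PySem.List.slice pairs none (some (i : Int))
      ([["^^^^^", "^^^^^"] ++ chunk.map (fun p => (p.getD ("", "")).1) ++ ["$$$$$", "$$$$$"]] ++ rest.1,
       [["Start-", "Start-"] ++ chunk.map (fun p => (p.getD ("", "")).2) ++ ["End-", "End-"]] ++ rest.2)
termination_by pairs.length
decreasing_by
  obtain ⟨hk, -, -⟩ := PySem.List.getElem_of_index?_eq_some h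
  have hcast : ((i : Int) + 1) = (((i + 1 : Nat)) : Int) := by push_cast; ring
  rw [hcast, PySem.List.slice_from_natCast]
  simp only [List.length_drop]
  omega

def parse_tag_reading_alt (lines : List String) (seperator : String) :
    List (List String) × List (List String) :=
  pbGroup (pbTok lines seperator)

-- ===== PRECONDITION & SPEC =====
-- Both Pythons raise on any non-empty line whose rsplit does not yield two pieces: ValueError
-- from rsplit('', 1) for an empty separator, IndexError (A) / unpacking ValueError (B) when the
-- separator is absent from the line; exactly those inputs are excluded.
def Pre_parse_tag_reading (lines : List String) (seperator : String) : Prop :=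
  ∀ l ∈ lines, l ≠ "" → seperator ≠ "" ∧ PySem.Str.isIn seperator l = true
instance (lines : List String) (seperator : String) : Decidable (Pre_parse_tag_reading lines seperator) := by unfold Pre_parse_tag_reading; infer_instance
def pvWitness_parse_tag_reading : List String × String := (["a b", "", "c x y", "z q", ""], " ")
def Spec_parse_tag_reading (lines : List String) (seperator : String) (out : List (List String) × List (List String)) : Prop := out = parse_tag_reading_alt lines seperator
instance (lines : List String) (seperator : String) (out : List (List String) × List (List String)) : Decidable (Spec_parse_tag_reading lines seperator out) := by unfold Spec_parse_tag_reading; infer_instance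

-- ===== CLAIM =====
def Claim_equal_parse_tag_reading : Prop := ∀ (lines : List String) (seperator : String), Dom_parse_tag_reading lines seperator → Pre_parse_tag_reading lines seperator → Spec_parse_tag_reading lines seperator (parse_tag_reading lines seperator)

-- ===== LEMMAS AND PROOFS =====
-- A's per-line word/label extraction, named for the proofs.
def pvHA (l sep : String) : String := (PySem.List.pyGet? (pyRsplit1 l sep) 0).getD ""
def pvTA (l sep : String) : String := (PySem.List.pyGet? (pyRsplit1 l sep) 1).getD ""

-- A's step on a blank line closes the current sentence
lemma pvStep_blank (sep : String) (st : List (List String) × List (List String) × List String × List String) :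
    paStep sep st ""
    = (st.1 ++ [["^^^^^", "^^^^^"] ++ st.2.2.1 ++ ["$$$$$", "$$$$$"]],
       st.2.1 ++ [["Start-", "Start-"] ++ st.2.2.2 ++ ["End-", "End-"]], [], []) := by
  simp [paStep]

-- A's fold over a blank-free chunk only extends the current sentence
lemma pvFoldA_clean (sep : String) (pre : List String) (hpre : "" ∉ pre)
    (ws lbs : List (List String)) (s sl : List String) :
    pre.foldl (paStep sep) (ws, lbs, s, sl)
    = (ws, lbs, s ++ pre.map (fun l => pvHA l sep), sl ++ pre.map (fun l => pvTA l sep)) := by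
  induction pre generalizing s sl with
  | nil => simp
  | cons l ls ih =>
      have hl : l ≠ "" := by rintro rfl; exact hpre List.mem_cons_self
      have hls : "" ∉ ls := fun h => hpre (List.mem_cons_of_mem _ h)
      simp only [List.foldl_cons, paStep, if_pos hl, ih hls]
      simp [pvHA, pvTA]

-- finished sentences already in the state pass through A's fold as a prefix
lemma pvFoldA_prefix (sep : String) (lines : List String)
    (ws lbs : List (List String)) (s sl : List String) :
    lines.foldl (paStep sep) (ws, lbs, s, sl)
    = (ws ++ (lines.foldl (paStep sep) ([], [], s, sl)).1,
       lbs ++ (lines.foldl (paStep sep) ([], [], s, sl)).2.1,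
       (lines.foldl (paStep sep) ([], [], s, sl)).2.2.1,
       (lines.foldl (paStep sep) ([], [], s, sl)).2.2.2) := by
  induction lines generalizing ws lbs s sl with
  | nil => simp
  | cons l ls ih =>
      by_cases hl : l = ""
      · subst hl
        simp only [List.foldl_cons, pvStep_blank, List.nil_append]
        rw [ih (ws ++ [_]) (lbs ++ [_]) [] [], ih [_] [_] [] []]
        simp
      · simp only [List.foldl_cons, paStep, if_pos hl]
        rw [ih ws lbs _ _]

-- tokenizing a blank-free chunk yields no boundary marker
lemma pvTok_no_none (sep : String) (pre : List String) (hpre : "" ∉ pre) :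
    none ∉ pbTok pre sep := by
  simp only [pbTok, List.mem_map]
  rintro ⟨l, hl, hf⟩
  by_cases h : l = ""
  · exact hpre (h ▸ hl)
  · simp [h] at hf

-- the two projections of a blank-free tokenized chunk are A's extractions
lemma pvChunk_fst (sep : String) (pre : List String) (hpre : "" ∉ pre) :
    (pbTok pre sep).map (fun p => (p.getD ("", "")).1) = pre.map (fun l => pvHA l sep) := by
  simp only [pbTok, List.map_map]
  apply List.map_congr_left
  intro l hl
  have h : l ≠ "" := fun h => hpre (h ▸ hl)
  simp [h, pvHA]

lemma pvChunk_snd (sep : String) (pre : List String) (hpre : "" ∉ pre) :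
    (pbTok pre sep).map (fun p => (p.getD ("", "")).2) = pre.map (fun l => pvTA l sep) := by
  simp only [pbTok, List.map_map]
  apply List.map_congr_left
  intro l hl
  have h : l ≠ "" := fun h => hpre (h ▸ hl)
  simp [h, pvTA]

lemma pvMain : ∀ (n : Nat) (lines : List String) (sep : String), lines.length ≤ n →
    parse_tag_reading lines sep = pbGroup (pbTok lines sep) := by
  intro n
  induction n with
  | zero =>
      intro lines sep hlen
      have hnil : lines = [] := List.eq_nil_of_length_eq_zero (by omega)
      subst hnil
      have hidx : PySem.List.index? ([] : List (Option (String × String))) none = none :=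
        (PySem.List.index?_eq_none_iff _ _).2 (by simp)
      unfold pbGroup
      rw [show pbTok [] sep = [] from rfl, hidx]
      rfl
  | succ n ih =>
      intro lines sep hlen
      cases hidx : PySem.List.index? lines "" with
      | none =>
          have hnm : "" ∉ lines := (PySem.List.index?_eq_none_iff lines "").1 hidx
          have hidx' : PySem.List.index? (pbTok lines sep) none = none :=
            (PySem.List.index?_eq_none_iff _ _).2 (pvTok_no_none sep lines hnm)
          unfold pbGroup
          rw [hidx']
          unfold parse_tag_reading
          rw [pvFoldA_clean sep lines hnm [] [] [] []]
      | some i =>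
          obtain ⟨pre, suf, hsplit, hlenpre, hnmpre⟩ :=
            (PySem.List.index?_eq_some_iff lines "" i).1 hidx
          subst hsplit
          -- tokenization splits the same way
          have htok : pbTok (pre ++ "" :: suf) sep
              = pbTok pre sep ++ none :: pbTok suf sep := by
            simp [pbTok]
          have hidx' : PySem.List.index? (pbTok (pre ++ "" :: suf) sep) none
              = some (pbTok pre sep).length :=
            (PySem.List.index?_eq_some_iff _ _ _).2
              ⟨pbTok pre sep, pbTok suf sep, htok, rfl, pvTok_no_none sep pre hnmpre⟩
          have hlentok : (pbTok pre sep).length = pre.length := by simp [pbTok]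
          have htake : PySem.List.slice (pbTok (pre ++ "" :: suf) sep) none
              (some ((pbTok pre sep).length : Int)) = pbTok pre sep := by
            rw [PySem.List.slice_to_natCast, htok, List.take_left]
          have hdrop : PySem.List.slice (pbTok (pre ++ "" :: suf) sep)
              (some (((pbTok pre sep).length : Int) + 1)) none = pbTok suf sep := by
            have hcast : (((pbTok pre sep).length : Int) + 1)
                = ((((pbTok pre sep).length + 1 : Nat)) : Int) := by push_cast; ring
            rw [hcast, PySem.List.slice_from_natCast, htok]
            have h1 : pbTok pre sep ++ none :: pbTok suf sep
                = (pbTok pre sep ++ [none]) ++ pbTok suf sep := by simp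
            have h2 : (pbTok pre sep).length + 1 = (pbTok pre sep ++ [none]).length := by simp
            rw [h1, h2, List.drop_left]
          -- B side: one unfolding of the grouping recursion
          unfold pbGroup
          rw [hidx']
          simp only [htake, hdrop]
          have hsuflen : suf.length ≤ n := by
            simp only [List.length_append, List.length_cons] at hlen
            omega
          rw [← ih suf sep hsuflen]
          -- A side
          unfold parse_tag_reading
          rw [List.foldl_append, pvFoldA_clean sep pre hnmpre [] [] [] []]
          simp only [List.foldl_cons, pvStep_blank, List.nil_append]
          rw [pvFoldA_prefix sep suf [_] [_] [] []]
          simp [pvChunk_fst sep pre hnmpre, pvChunk_snd sep pre hnmpre]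

-- ===== VERDICT =====
theorem parse_tag_reading_spec : Claim_equal_parse_tag_reading := by
  intro lines seperator _ _
  unfold Spec_parse_tag_reading parse_tag_reading_alt
  exact pvMain lines.length lines seperator le_rfl
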